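-- pv_equiv track=rewrite | github.com/armahdavi/Scale_AI_LLM_Prompt_Engineering_Tuning_Evaluation | coders_fullstack_code_eval_attempter/python/distribution_round_robin_fashion.py | distribute_remaining_size
-- ===== SOURCE A (Python) =====
-- def distribute_remaining_size(sizes, remaining_size, rankings):
--     """
--     Distributes the remaining size among the elements of the sizes array in a round-robin fashion,
--     based on the ranking array.
--
--     Args:
--         sizes (list): The array of sizes to be updated.
--         remaining_size (int): The remaining size to be distributed.
--         rankings (list): The ranking array, where 0 has the highest priority and -1 means no allocation.
--
--     Returns:
--         list: The updated sizes array.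
--     """
--     # Create a copy of the sizes array to avoid modifying the original array
--     updated_sizes = sizes[:]
--
--     # Create a list of indices to be updated, sorted by ranking
--     indices_to_update = sorted((i for i, r in enumerate(rankings) if r!= -1), key=lambda i: rankings[i])
--
--     # Distribute the remaining size in a round-robin fashion
--     while remaining_size > 0:
--         for i in indices_to_update:
--             if remaining_size > 0:
--                 updated_sizes[i] += 1
--                 remaining_size -= 1
--             else:
--                 break
--
--     return updated_sizes
-- ===== SOURCE B (Python) =====
-- def distribute_remaining_size(sizes, remaining_size, rankings):
--     """Closed-form round-robin: each ranked index gets quotient extra units,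
--     the first remainder ones (in ranking order) get one more."""
--     updated_sizes = sizes[:]
--     indices_to_update = sorted((i for i, r in enumerate(rankings) if r != -1),
--                                key=lambda i: rankings[i])
--     if remaining_size <= 0 or not indices_to_update:
--         return updated_sizes
--     q, r = divmod(remaining_size, len(indices_to_update))
--     for pos, i in enumerate(indices_to_update):
--         updated_sizes[i] += q + (1 if pos < r else 0)
--     return updated_sizes
-- ===== Notes on version B (the rewrite author's own statement) =====
-- stated objective: alternative
-- what changed: Replaces A's while-loop that hands out one unit at a time with a closed-form divmod: every ranked index gets remaining_size // k extra and the first remaining_size % k indices in ranking order get one more.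
-- outside the precondition, e.g. on distribute_remaining_size([0], 1, [0, 5]): A returns [1], B raises IndexError
import Mathlib
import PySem

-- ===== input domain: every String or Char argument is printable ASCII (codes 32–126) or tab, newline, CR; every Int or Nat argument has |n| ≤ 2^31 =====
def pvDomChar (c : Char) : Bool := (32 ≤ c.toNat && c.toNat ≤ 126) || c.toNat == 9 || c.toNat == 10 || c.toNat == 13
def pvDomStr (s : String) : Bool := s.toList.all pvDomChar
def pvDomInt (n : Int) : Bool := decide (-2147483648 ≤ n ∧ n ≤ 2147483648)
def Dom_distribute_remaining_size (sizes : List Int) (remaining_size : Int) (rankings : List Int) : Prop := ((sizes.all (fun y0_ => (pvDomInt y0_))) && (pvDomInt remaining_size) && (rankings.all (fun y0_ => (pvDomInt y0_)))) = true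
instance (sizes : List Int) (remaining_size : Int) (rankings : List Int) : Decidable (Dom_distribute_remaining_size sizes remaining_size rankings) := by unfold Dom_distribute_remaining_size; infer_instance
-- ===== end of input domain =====

-- B replaces A's unit-by-unit round-robin while-loop by a single divmod formula; the return value's equality is proved below.

-- shared primitive: `updated_sizes[i] += a` for a non-negative in-range index
-- (totalized: a no-op where Python would raise IndexError; such inputs are outside Pre_)
def pvAddAt (s : List Int) (i : Int) (a : Int) : List Int :=
  s.set i.toNat (s.getD i.toNat 0 + a)

-- `sorted((i for i, r in enumerate(rankings) if r != -1), key=lambda i: rankings[i])`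
-- (this line is identical in A and in B)
def pvIdxs (rankings : List Int) : List Int :=
  PySem.List.sorted (((PySem.List.enumerate rankings 0).filter (fun p => p.2 ≠ -1)).map (fun p => p.1))
    (fun i => PySem.List.pyGetD rankings i 0) false

-- ===== PORT A =====
-- the inner `for i in indices_to_update: if remaining_size > 0: … else break`
def pvPassA : List Int → Int → List Int → (List Int × Int)
  | s, rem, [] => (s, rem)
  | s, rem, i :: rest => if 0 < rem then pvPassA (pvAddAt s i 1) (rem - 1) rest else (s, rem)

theorem pvPassA_snd (l : List Int) (s : List Int) (rem : Int) (h : 0 ≤ rem) :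
    (pvPassA s rem l).2 = max (rem - l.length) 0 := by
  induction l generalizing s rem with
  | nil => simp [pvPassA]; omega
  | cons i rest ih =>
    simp only [pvPassA]
    by_cases hr : 0 < rem
    · rw [if_pos hr, ih _ _ (by omega)]
      simp; omega
    · rw [if_neg hr]
      simp; omega

-- the outer `while remaining_size > 0:` (the `idxs ≠ []` conjunct is a pure
-- termination guard: there the Python while-loop never terminates, outside Pre_)
def pvLoopA (s : List Int) (rem : Int) (idxs : List Int) : List Int :=
  if h : 0 < rem ∧ idxs ≠ [] then
    pvLoopA (pvPassA s rem idxs).1 (pvPassA s rem idxs).2 idxs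
  else s
termination_by rem.toNat
decreasing_by
  rw [pvPassA_snd idxs s rem (le_of_lt h.1)]
  have : 0 < idxs.length := List.length_pos_iff.mpr h.2
  omega

def distribute_remaining_size (sizes : List Int) (remaining_size : Int) (rankings : List Int) : List Int :=
  pvLoopA sizes remaining_size (pvIdxs rankings)

-- ===== PORT B =====
-- `for pos, i in enumerate(indices_to_update): updated_sizes[i] += q + (1 if pos < r else 0)`
def pvDistApply : List Int → List Int → Int → Int → Int → List Int
  | s, [], _, _, _ => s
  | s, i :: rest, pos, q, r => pvDistApply (pvAddAt s i (q + if pos < r then 1 else 0)) rest (pos + 1) q r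

def distribute_remaining_size_alt (sizes : List Int) (remaining_size : Int) (rankings : List Int) : List Int :=
  let idxs := pvIdxs rankings
  if remaining_size ≤ 0 ∨ idxs = [] then sizes
  else pvDistApply sizes idxs 0 (PySem.Int.floordiv remaining_size idxs.length)
         (PySem.Int.mod remaining_size idxs.length)

-- ===== PRECONDITION & SPEC =====
-- Pre_ excludes inputs with remaining_size > 0 where either every ranking is -1
-- (A's while-loop never terminates) or some ranked index falls beyond sizes
-- (Python raises IndexError: A as soon as the round-robin reaches that index —
-- occasionally A exhausts remaining_size first and still returns — and B always,
-- since B touches every ranked index once).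
def Pre_distribute_remaining_size (sizes : List Int) (remaining_size : Int) (rankings : List Int) : Prop :=
  remaining_size ≤ 0 ∨
    ((∃ r ∈ rankings, r ≠ -1) ∧ ∀ r ∈ rankings.drop sizes.length, r = -1)
instance (sizes : List Int) (remaining_size : Int) (rankings : List Int) : Decidable (Pre_distribute_remaining_size sizes remaining_size rankings) := by unfold Pre_distribute_remaining_size; infer_instance

def pvWitness_distribute_remaining_size : List Int × Int × List Int := ([0, 0, 0], 5, [1, 0, -1])

def Spec_distribute_remaining_size (sizes : List Int) (remaining_size : Int) (rankings : List Int) (out : List Int) : Prop := out = distribute_remaining_size_alt sizes remaining_size rankings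
instance (sizes : List Int) (remaining_size : Int) (rankings : List Int) (out : List Int) : Decidable (Spec_distribute_remaining_size sizes remaining_size rankings out) := by unfold Spec_distribute_remaining_size; infer_instance

-- ===== CLAIM (what is proved, stated in full; the proofs are below) =====
def Claim_equal_distribute_remaining_size : Prop := ∀ (sizes : List Int) (remaining_size : Int) (rankings : List Int), Dom_distribute_remaining_size sizes remaining_size rankings → Pre_distribute_remaining_size sizes remaining_size rankings → Spec_distribute_remaining_size sizes remaining_size rankings (distribute_remaining_size sizes remaining_size rankings)

-- ===== LEMMAS AND PROOFS =====

theorem pvAddAt_getElem? (s : List Int) (i a : Int) (k : Nat) :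
    (pvAddAt s i a)[k]? = if k = i.toNat then s[k]?.map (· + a) else s[k]? := by
  unfold pvAddAt
  by_cases hk : k = i.toNat
  · subst hk
    by_cases hl : i.toNat < s.length
    · simp [hl, List.getD_eq_getElem?_getD]
    · simp [hl]
  · simp [Ne.symm hk, hk]

theorem pvAddAt_zero (s : List Int) (i : Int) : pvAddAt s i 0 = s := by
  apply List.ext_getElem?
  intro k
  rw [pvAddAt_getElem?]
  split_ifs <;> simp

theorem pvAddAt_addAt (s : List Int) (i : Int) (a b : Int) :
    pvAddAt (pvAddAt s i a) i b = pvAddAt s i (a + b) := by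
  apply List.ext_getElem?
  intro k
  rw [pvAddAt_getElem?, pvAddAt_getElem?, pvAddAt_getElem?]
  split_ifs with h
  · cases hsk : s[k]? <;> simp [add_assoc]
  · rfl

theorem pvAddAt_comm (s : List Int) (i j : Int) (a b : Int) :
    pvAddAt (pvAddAt s i a) j b = pvAddAt (pvAddAt s j b) i a := by
  apply List.ext_getElem?
  intro k
  rw [pvAddAt_getElem?, pvAddAt_getElem?, pvAddAt_getElem?, pvAddAt_getElem?]
  split_ifs with h1 h2 h2
  · cases hsk : s[k]? <;> simp [add_right_comm]
  · rfl
  · rfl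
  · rfl

-- an addAt commutes past a whole pvDistApply
theorem pvDistApply_addAt (l : List Int) (s : List Int) (j a pos q r : Int) :
    pvDistApply (pvAddAt s j a) l pos q r = pvAddAt (pvDistApply s l pos q r) j a := by
  induction l generalizing s pos with
  | nil => rfl
  | cons i rest ih =>
    simp only [pvDistApply]
    rw [pvAddAt_comm, ih]

-- a pass whose per-position amount is constant composes additively
theorem pvDistApply_const_then (l : List Int) (s : List Int) (pos q1 q2 r : Int) (hpos : 0 ≤ pos) :
    pvDistApply (pvDistApply s l pos q1 0) l pos q2 r
      = pvDistApply s l pos (q1 + q2) r := by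
  induction l generalizing s pos with
  | nil => rfl
  | cons i rest ih =>
    simp only [pvDistApply]
    rw [if_neg (by omega : ¬ pos < (0 : Int)), add_zero]
    rw [pvDistApply_addAt rest s i q1 (pos + 1) q1 0, pvAddAt_addAt,
        ← pvDistApply_addAt rest s i (q1 + (q2 + if pos < r then 1 else 0)) (pos + 1) q1 0]
    rw [ih _ _ (by omega), add_assoc]

-- amounts agreeing on the visited positions give equal results
theorem pvDistApply_congr (l : List Int) (s : List Int) (pos q1 r1 q2 r2 : Int)
    (h : ∀ p : Int, pos ≤ p → p < pos + l.length →
      (q1 + if p < r1 then 1 else 0) = (q2 + if p < r2 then 1 else 0)) :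
    pvDistApply s l pos q1 r1 = pvDistApply s l pos q2 r2 := by
  induction l generalizing s pos with
  | nil => rfl
  | cons i rest ih =>
    simp only [pvDistApply]
    rw [h pos le_rfl (by simp only [List.length_cons]; push_cast; omega)]
    exact ih _ _ (fun p h1 h2 => h p (by omega)
      (by simp only [List.length_cons] at h2 ⊢; push_cast at h2 ⊢; omega))

-- A's inner pass is a 0/1 distribution: position p gets 1 exactly when p < pos + rem
theorem pvPassA_fst (l : List Int) (s : List Int) (rem pos : Int) :
    (pvPassA s rem l).1 = pvDistApply s l pos 0 (pos + rem) := by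
  induction l generalizing s rem pos with
  | nil => rfl
  | cons i rest ih =>
    simp only [pvPassA, pvDistApply]
    by_cases hr : 0 < rem
    · rw [if_pos hr, if_pos (by omega : pos < pos + rem),
          ih (pvAddAt s i 1) (rem - 1) (pos + 1)]
      have harg : pos + 1 + (rem - 1) = pos + rem := by ring
      rw [harg]
      norm_num
    · rw [if_neg hr, if_neg (by omega : ¬ pos < pos + rem)]
      -- remaining positions all get amount 0
      have hz : ∀ (t : List Int) (s' : List Int) (p : Int) (hle : pos + rem ≤ p),
          pvDistApply s' t p 0 (pos + rem) = s' := by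
        intro t
        induction t with
        | nil => intro s' p hle; rfl
        | cons j tt iht =>
          intro s' p hle
          simp only [pvDistApply]
          rw [if_neg (by omega)]
          simp only [add_zero, pvAddAt_zero]
          exact iht _ _ (by omega)
      simp only [add_zero, pvAddAt_zero]
      exact (hz rest s (pos + 1) (by omega)).symm

-- the main loop characterisation: divide-and-spread closed form
theorem pvLoopA_closed (n : Nat) : ∀ (rem : Int), rem.toNat = n → 0 < rem →
    ∀ (s l : List Int), l ≠ [] →
    pvLoopA s rem l
      = pvDistApply s l 0 (PySem.Int.floordiv rem l.length) (PySem.Int.mod rem l.length) := by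
  induction n using Nat.strong_induction_on with
  | _ n ih =>
    intro rem hn hrem s l hl
    have hk : 0 < (l.length : Int) := by
      have := List.length_pos_iff.mpr hl; exact_mod_cast this
    rw [pvLoopA, dif_pos ⟨hrem, hl⟩]
    rw [pvPassA_snd l s rem (le_of_lt hrem)]
    rw [pvPassA_fst l s rem 0]
    simp only [zero_add]
    rw [PySem.Int.floordiv_eq_ediv_of_pos hk, PySem.Int.mod_eq_emod_of_pos hk]
    by_cases hle : rem ≤ (l.length : Int)
    · -- last (partial or exact) pass: loop stops
      have : max (rem - (l.length : Int)) 0 = 0 := by omega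
      rw [this, pvLoopA, dif_neg (by simp)]
      by_cases heq : rem = (l.length : Int)
      · -- exactly one full pass: amount 1 everywhere visited
        rw [heq, Int.ediv_self (by omega), Int.emod_self]
        exact pvDistApply_congr l s 0 0 (l.length : Int) 1 0
          (fun p h1 h2 => by simp at h2; split_ifs <;> omega)
      · rw [Int.ediv_eq_zero_of_lt (by omega) (by omega),
            Int.emod_eq_of_lt (by omega) (by omega)]
    · -- a full pass of +1, then recurse on rem - k
      have hmax : max (rem - (l.length : Int)) 0 = rem - l.length := by omega
      rw [hmax]
      have hrem' : 0 < rem - (l.length : Int) := by omega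
      rw [ih (rem - (l.length : Int)).toNat (by omega) _ rfl hrem' _ l hl]
      rw [PySem.Int.floordiv_eq_ediv_of_pos hk, PySem.Int.mod_eq_emod_of_pos hk]
      have h1 : pvDistApply s l 0 0 rem = pvDistApply s l 0 1 0 :=
        pvDistApply_congr l s 0 0 rem 1 0
          (fun p hp1 hp2 => by simp at hp2; split_ifs <;> omega)
      rw [h1, pvDistApply_const_then l s 0 1 _ _ le_rfl]
      have hd : 1 + (rem - (l.length : Int)) / (l.length : Int) = rem / (l.length : Int) := by
        have := Int.add_mul_ediv_right (rem - (l.length : Int)) 1 (by omega : (l.length : Int) ≠ 0)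
        simp at this; omega
      have hm : (rem - (l.length : Int)) % (l.length : Int) = rem % (l.length : Int) :=
        Int.sub_emod_right rem (l.length : Int)
      rw [hd, hm]

-- nonempty ranked-index list from the Pre_ existence conjunct
theorem pvIdxs_ne_nil (rankings : List Int) (h : ∃ r ∈ rankings, r ≠ -1) :
    pvIdxs rankings ≠ [] := by
  obtain ⟨r, hr, hne⟩ := h
  unfold pvIdxs
  rw [Ne, PySem.List.sorted_eq_nil_iff]
  simp only [List.map_eq_nil_iff, List.filter_eq_nil_iff]
  intro hall
  have : r ∈ (PySem.List.enumerate rankings 0).map (fun p => p.2) := by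
    rw [PySem.List.map_snd_enumerate]; exact hr
  obtain ⟨p, hp, hp2⟩ := List.mem_map.mp this
  have := hall p hp
  simp [hp2] at this
  exact hne this

-- ===== VERDICT (by name: the statement is the Claim_ definition above) =====
theorem distribute_remaining_size_spec : Claim_equal_distribute_remaining_size := by
  intro sizes rem rankings _ hpre
  unfold Spec_distribute_remaining_size distribute_remaining_size distribute_remaining_size_alt
  by_cases hr : rem ≤ 0
  · rw [pvLoopA, dif_neg (by intro h; exact hr.not_gt h.1), if_pos (Or.inl hr)]
  · have hne : pvIdxs rankings ≠ [] := by
      rcases hpre with h | ⟨hex, _⟩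
      · exact absurd h hr
      · exact pvIdxs_ne_nil rankings hex
    rw [if_neg (fun hc => hc.elim hr hne)]
    exact pvLoopA_closed rem.toNat rem rfl (by omega) sizes (pvIdxs rankings) hne
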